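-- pv_equiv track=rewrite | github.com/fjpAntunes/Classification-Tools | BusEx/obia/Obia3 - Pós formatação.py | disambiguate
-- ===== SOURCE A (Python) =====
-- def disambiguate(segments_per_klass):
--     accum = set()
--     intersection = set()
--     for class_segments in segments_per_klass.values():
--         intersection |= accum.intersection(class_segments)
--         accum |= class_segments
--     assert len(intersection) == 0
--     return accum, intersection
-- ===== SOURCE B (Python) =====
-- def disambiguate(segments_per_klass):
--     # Flatten all class sets, then dedupe: disjointness holds iff flattening
--     # introduced no duplicate, checked by comparing lengths.
--     flat = [x for s in segments_per_klass.values() for x in s]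
--     union = set(flat)
--     assert len(flat) == len(union)
--     return union, set()
-- ===== Notes on version B (the rewrite author's own statement) =====
-- stated objective: alternative
-- what changed: B flattens every class set into one list and dedupes it once, checking disjointness by comparing the flat length with the union size, instead of A's single fold maintaining a running union and a running cross-class intersection set.
import Mathlib
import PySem

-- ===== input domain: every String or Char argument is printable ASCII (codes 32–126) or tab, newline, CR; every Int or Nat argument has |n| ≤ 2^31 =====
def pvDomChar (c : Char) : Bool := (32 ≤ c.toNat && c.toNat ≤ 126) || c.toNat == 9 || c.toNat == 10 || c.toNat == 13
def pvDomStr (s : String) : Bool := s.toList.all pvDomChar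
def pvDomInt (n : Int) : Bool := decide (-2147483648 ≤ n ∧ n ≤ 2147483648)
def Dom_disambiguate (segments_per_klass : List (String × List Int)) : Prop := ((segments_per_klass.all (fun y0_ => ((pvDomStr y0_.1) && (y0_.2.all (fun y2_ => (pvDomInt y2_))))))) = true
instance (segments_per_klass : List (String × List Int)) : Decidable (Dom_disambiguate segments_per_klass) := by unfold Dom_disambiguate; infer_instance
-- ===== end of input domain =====

-- B flattens all class sets into one list and dedupes it once (checking disjointness by
-- length comparison) instead of A's fold carrying a running union and a running
-- cross-class intersection set (alternative, same cost).


-- ===== PORT A =====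
-- accum/intersection loop over the dict's values; the trailing `assert` is modelled by Pre_.
def disambiguate (segments_per_klass : List (String × List Int)) : List Int × List Int :=
  let st := ((PySem.Dict.ofList segments_per_klass).values).foldl
    (fun (st : List Int × List Int) class_segments =>
      (PySem.Set.union st.1 class_segments,
       PySem.Set.union st.2 (PySem.Set.inter st.1 class_segments)))
    (PySem.Set.empty, PySem.Set.empty)
  (st.1, st.2)

-- ===== PORT B =====
-- flatten all class sets into one list, dedupe once; the length-comparison `assert` is modelled by Pre_.
def disambiguate_alt (segments_per_klass : List (String × List Int)) : List Int × List Int :=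
  let flat := ((PySem.Dict.ofList segments_per_klass).values).flatMap (fun s => s)
  (PySem.Set.ofList flat, PySem.Set.empty)

-- ===== PRECONDITION & SPEC =====
-- Pre_ excludes (a) value lists with duplicates — they do not represent a Python set, the
-- declared value type — and (b) inputs with an element shared by two classes, on which both
-- Pythons raise AssertionError (A's intersection is nonempty, B's flat list is longer than its union).
def Pre_disambiguate (segments_per_klass : List (String × List Int)) : Prop :=
  (∀ cs ∈ (PySem.Dict.ofList segments_per_klass).values, cs.Nodup) ∧
  ((PySem.Dict.ofList segments_per_klass).values).Pairwise (fun a b => ∀ x ∈ a, x ∉ b)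
instance (segments_per_klass : List (String × List Int)) : Decidable (Pre_disambiguate segments_per_klass) := by unfold Pre_disambiguate; infer_instance

def pvWitness_disambiguate : (List (String × List Int)) := [("a", [1, 2]), ("b", [3])]

def Spec_disambiguate (segments_per_klass : List (String × List Int)) (out : List Int × List Int) : Prop := out = disambiguate_alt segments_per_klass
instance (segments_per_klass : List (String × List Int)) (out : List Int × List Int) : Decidable (Spec_disambiguate segments_per_klass out) := by unfold Spec_disambiguate; infer_instance

-- ===== CLAIM (what is proved, stated in full; the proofs are below) =====
def Claim_equal_disambiguate : Prop := ∀ (segments_per_klass : List (String × List Int)), Dom_disambiguate segments_per_klass → Pre_disambiguate segments_per_klass → Spec_disambiguate segments_per_klass (disambiguate segments_per_klass)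

-- ===== LEMMAS AND PROOFS =====

-- First component of A's fold is the plain running union.
theorem fstA_eq_foldl_union (vals : List (List Int)) (a i : List Int) :
    (vals.foldl (fun (st : List Int × List Int) cs =>
        (PySem.Set.union st.1 cs, PySem.Set.union st.2 (PySem.Set.inter st.1 cs))) (a, i)).1
      = vals.foldl (fun s cs => PySem.Set.union s cs) a := by
  induction vals generalizing a i with
  | nil => rfl
  | cons c t ih => simp [List.foldl, ih]

-- Folding unions is folding Set.add over the flattened values.
theorem foldl_union_eq_flatMap (vals : List (List Int)) (a : List Int) :
    vals.foldl (fun s cs => PySem.Set.union s cs) a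
      = (vals.flatMap (fun s => s)).foldl PySem.Set.add a := by
  induction vals generalizing a with
  | nil => rfl
  | cons c t ih =>
    have hu : PySem.Set.union a c = c.foldl PySem.Set.add a := rfl
    simp [List.foldl, ih, List.flatMap_cons, List.foldl_append, hu]

theorem inter_eq_nil_of_disjoint (s t : List Int) (h : ∀ x ∈ s, x ∉ t) :
    PySem.Set.inter s t = [] := by
  simp only [PySem.Set.inter, List.filter_eq_nil_iff]
  intro x hx
  simpa using h x hx

-- A's running intersection stays empty while the accumulator stays disjoint from every
-- remaining value, given pairwise-disjoint values.
theorem sndA_eq_nil (vals : List (List Int)) (a : List Int)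
    (hpw : vals.Pairwise (fun a b => ∀ x ∈ a, x ∉ b))
    (hacc : ∀ cs ∈ vals, ∀ x ∈ a, x ∉ cs) :
    (vals.foldl (fun (st : List Int × List Int) cs =>
        (PySem.Set.union st.1 cs, PySem.Set.union st.2 (PySem.Set.inter st.1 cs))) (a, [])).2
      = [] := by
  induction vals generalizing a with
  | nil => rfl
  | cons c t ih =>
    have hdisj : PySem.Set.inter a c = [] :=
      inter_eq_nil_of_disjoint a c (hacc c (by simp))
    have hstep : PySem.Set.union ([] : List Int) (PySem.Set.inter a c) = [] := by
      rw [hdisj]; rfl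
    simp only [List.foldl, hstep]
    refine ih _ (List.Pairwise.of_cons hpw) ?_
    intro cs hcs x hx
    rcases (PySem.Set.mem_union _ _ _).1 hx with hxa | hxc
    · exact hacc cs (by simp [hcs]) x hxa
    · exact (List.pairwise_cons.1 hpw).1 cs hcs x hxc

-- ===== VERDICT (by name: the statement is the Claim_ definition above) =====
theorem disambiguate_spec : Claim_equal_disambiguate := by
  intro spk _ hpre
  unfold Spec_disambiguate disambiguate disambiguate_alt
  have h1 := fstA_eq_foldl_union ((PySem.Dict.ofList spk).values) PySem.Set.empty PySem.Set.empty
  have h2 := foldl_union_eq_flatMap ((PySem.Dict.ofList spk).values) PySem.Set.empty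
  have h3 := sndA_eq_nil ((PySem.Dict.ofList spk).values) PySem.Set.empty hpre.2
      (by intro cs _ x hx; simp [PySem.Set.empty] at hx)
  refine Prod.ext ?_ ?_
  · have : PySem.Set.ofList (((PySem.Dict.ofList spk).values).flatMap (fun s => s))
        = (((PySem.Dict.ofList spk).values).flatMap (fun s => s)).foldl PySem.Set.add PySem.Set.empty :=
      PySem.Set.ofList_eq_foldl _
    simpa [PySem.Set.empty, this] using h1.trans h2
  · simpa [PySem.Set.empty] using h3
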